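-- pv_equiv track=rewrite | github.com/FaridaAlakbarli/Hackerrank-challenges | BeautifulBinaryString.py | beautifulBinaryString
-- ===== SOURCE A (Python) =====
-- def beautifulBinaryString(b):
--     l = len(b)
--     lis = list(b)
--     counter = 0
--     for i in range(l-2):
--         sublist = lis[i:i+3]
--         if sublist == ['0','1','0']:
--             lis[i+2] = '1'
--             counter += 1
--
--     return counter
-- ===== SOURCE B (Python) =====
-- def beautifulBinaryString(b):
--     # Greedily rewriting each found '010' to '011' never enables or blocks a
--     # later match other than forcing the next match to start >= 3 positions on,
--     # so the answer is the number of non-overlapping '010' occurrences.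
--     return b.count("010")
-- ===== Notes on version B (the rewrite author's own statement) =====
-- stated objective: simpler
-- what changed: Replaces the index-by-index slice-compare-and-mutate loop over a list buffer by a single non-overlapping occurrence count b.count('010'), with no mutable state, justified by the fact that rewriting '010' to '011' can never create or destroy another occurrence except to force the next match at least 3 positions later.
import Mathlib
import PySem

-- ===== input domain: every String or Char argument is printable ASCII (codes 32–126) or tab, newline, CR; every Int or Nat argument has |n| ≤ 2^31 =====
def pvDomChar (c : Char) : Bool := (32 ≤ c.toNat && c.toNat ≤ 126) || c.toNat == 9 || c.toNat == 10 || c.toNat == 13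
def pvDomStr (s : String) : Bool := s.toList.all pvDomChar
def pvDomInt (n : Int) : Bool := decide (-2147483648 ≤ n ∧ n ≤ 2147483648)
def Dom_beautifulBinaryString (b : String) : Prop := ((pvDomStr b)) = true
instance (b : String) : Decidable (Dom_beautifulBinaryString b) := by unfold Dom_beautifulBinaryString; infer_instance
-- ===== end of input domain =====

-- B replaces A's slice-compare-and-mutate loop over a list buffer by a single
-- non-overlapping occurrence count b.count("010") (objective: simpler).

-- ===== PORT A =====
-- Loop state is (lis, counter); lis[i+2] = '1' is pySetD (at a match i+2 is
-- always in range, so pySetD is exact there).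
def beautifulBinaryString (b : String) : Int :=
  let l : Int := PySem.Str.len b
  let lis : List Char := b.toList
  let res := (PySem.List.pyRange 0 (l - 2) 1).foldl
    (fun (st : List Char × Int) i =>
      let sublist := PySem.List.slice st.1 (some i) (some (i + 3))
      if sublist = ['0', '1', '0'] then
        (PySem.List.pySetD st.1 (i + 2) '1', st.2 + 1)
      else st)
    (lis, 0)
  res.2

-- ===== PORT B =====
def beautifulBinaryString_alt (b : String) : Int :=
  (PySem.Str.count b "010" : Int)

-- ===== PRECONDITION & SPEC =====
def Spec_beautifulBinaryString (b : String) (out : Int) : Prop := out = beautifulBinaryString_alt b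
instance (b : String) (out : Int) : Decidable (Spec_beautifulBinaryString b out) := by unfold Spec_beautifulBinaryString; infer_instance

-- ===== CLAIM (what is proved, stated in full; the proofs are below) =====
def Claim_equal_beautifulBinaryString : Prop := ∀ (b : String), Dom_beautifulBinaryString b → Spec_beautifulBinaryString b (beautifulBinaryString b)

-- ===== LEMMAS AND PROOFS =====

-- Fuel-free count of non-overlapping ['0','1','0'] occurrences (B's value).
def cnt : List Char → Nat
  | '0' :: '1' :: '0' :: r => cnt r + 1
  | _ :: t => cnt t
  | [] => 0

-- Structural form of A's loop acting on the suffix of the buffer from the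
-- current index onward ('1'::'1'::r is that suffix after the in-place write).
def loopD : List Char → Int → Int
  | a :: b :: c :: r, acc =>
      if a = '0' ∧ b = '1' ∧ c = '0' then loopD ('1' :: '1' :: r) (acc + 1)
      else loopD (b :: c :: r) acc
  | _, acc => acc
termination_by l _ => l.length

lemma cnt_match (r : List Char) : cnt ('0' :: '1' :: '0' :: r) = cnt r + 1 := rfl

lemma cnt_nil : cnt [] = 0 := rfl

lemma cnt_one (x : Char) : cnt [x] = 0 := by
  rw [cnt.eq_def]
  split
  · rename_i heq; simp at heq
  · rename_i heq; injection heq with _ h2; rw [← h2]; exact cnt_nil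
  · rename_i heq; cases heq

lemma cnt_two (x y : Char) : cnt [x, y] = 0 := by
  rw [cnt.eq_def]
  split
  · rename_i heq; simp at heq
  · rename_i heq; injection heq with _ h2; rw [← h2]; exact cnt_one y
  · rename_i heq; cases heq

lemma cnt_11 (r : List Char) : cnt ('1' :: '1' :: r) = cnt r := rfl

lemma cnt_cons₃ (a b c : Char) (r : List Char) :
    cnt (a :: b :: c :: r) =
      if a = '0' ∧ b = '1' ∧ c = '0' then cnt r + 1 else cnt (b :: c :: r) := by
  split
  · rename_i h; obtain ⟨h1, h2, h3⟩ := h; subst h1; subst h2; subst h3; rfl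
  · rename_i h
    rw [cnt.eq_def]
    split
    · rename_i heq
      injection heq with e1 heq; injection heq with e2 heq; injection heq with e3 _
      exact absurd ⟨e1, e2, e3⟩ h
    · rename_i heq
      injection heq with _ heq
      rw [heq]
    · rename_i heq; cases heq

lemma loopD_match (r : List Char) (acc : Int) :
    loopD ('0' :: '1' :: '0' :: r) acc = loopD ('1' :: '1' :: r) (acc + 1) := by
  rw [loopD]; simp

lemma loopD_nomatch (a b c : Char) (r : List Char) (acc : Int)
    (h : ¬ (a = '0' ∧ b = '1' ∧ c = '0')) :
    loopD (a :: b :: c :: r) acc = loopD (b :: c :: r) acc := by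
  rw [loopD, if_neg h]

lemma loopD_short (l : List Char) (acc : Int) (h : l.length < 3) : loopD l acc = acc := by
  match l, h with
  | [], _ => rw [loopD]; simp
  | [a], _ => rw [loopD]; simp
  | [a, b], _ => rw [loopD]; simp

lemma loopD_eq_cnt : ∀ (n : Nat) (l : List Char) (acc : Int), l.length = n →
    loopD l acc = acc + (cnt l : Int) := by
  intro n
  induction n with
  | zero =>
      intro l acc ht
      have hl : l = [] := List.length_eq_zero_iff.mp ht
      subst hl
      rw [loopD_short [] acc (by simp), cnt_nil]
      simp
  | succ m ih =>
      intro l acc ht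
      match l with
      | [] => rw [loopD_short [] acc (by simp), cnt_nil]; simp
      | [a] => rw [loopD_short [a] acc (by simp), cnt_one a]; simp
      | [a, b] => rw [loopD_short [a, b] acc (by simp), cnt_two a b]; simp
      | a :: b :: c :: r =>
        simp only [List.length_cons] at ht
        by_cases hm : a = '0' ∧ b = '1' ∧ c = '0'
        · obtain ⟨h1, h2, h3⟩ := hm
          subst h1; subst h2; subst h3
          rw [loopD_match r acc,
              ih ('1' :: '1' :: r) (acc + 1) (by simp; omega),
              cnt_match, cnt_11]
          push_cast; ring
        · rw [loopD_nomatch a b c r acc hm,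
              ih (b :: c :: r) acc (by simp; omega),
              cnt_cons₃, if_neg hm]

-- A's fold, started at index pre.length into the buffer pre ++ t, computes loopD t.
lemma bridge : ∀ (n : Nat) (t pre : List Char) (acc : Int), t.length = n →
    ((PySem.List.pyRange (pre.length : Int)
        ((pre.length : Int) + (t.length : Int) - 2) 1).foldl
      (fun (st : List Char × Int) i =>
        let sublist := PySem.List.slice st.1 (some i) (some (i + 3))
        if sublist = ['0', '1', '0'] then
          (PySem.List.pySetD st.1 (i + 2) '1', st.2 + 1)
        else st)
      (pre ++ t, acc)).2 = loopD t acc := by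
  intro n
  induction n with
  | zero =>
      intro t pre acc ht
      have ht0 : t = [] := List.length_eq_zero_iff.mp ht
      subst ht0
      rw [PySem.List.pyRange_one_eq_nil (by simp)]
      simp [loopD_short]
  | succ m ih =>
      intro t pre acc ht
      match t with
      | [] =>
          rw [PySem.List.pyRange_one_eq_nil (by simp)]
          simp [loopD_short]
      | [a] =>
          rw [PySem.List.pyRange_one_eq_nil (by simp)]
          simp [loopD_short [a] acc (by simp)]
      | [a, b] =>
          rw [PySem.List.pyRange_one_eq_nil (by simp)]
          simp [loopD_short [a, b] acc (by simp)]
      | a :: b :: c :: r =>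
        simp only [List.length_cons] at ht
        have hcons : PySem.List.pyRange (pre.length : Int)
            ((pre.length : Int) + ((a :: b :: c :: r).length : Int) - 2) 1 =
            (pre.length : Int) :: PySem.List.pyRange ((pre.length : Int) + 1)
              ((pre.length : Int) + ((a :: b :: c :: r).length : Int) - 2) 1 := by
          apply PySem.List.pyRange_one_cons; simp; omega
        rw [hcons, List.foldl_cons]
        have hslice : PySem.List.slice (pre ++ a :: b :: c :: r)
            (some (pre.length : Int)) (some ((pre.length : Int) + 3)) = [a, b, c] := by
          have h3 : ((pre.length : Int) + 3) = ((pre.length : Int) + ((3 : Nat) : Int)) := by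
            norm_num
          rw [h3, PySem.List.slice_natCast_add]
          simp [List.take]
        by_cases hm : a = '0' ∧ b = '1' ∧ c = '0'
        · obtain ⟨h1, h2, h3⟩ := hm
          subst h1; subst h2; subst h3
          simp only [hslice, if_true]
          have hset : PySem.List.pySetD (pre ++ '0' :: '1' :: '0' :: r)
              ((pre.length : Int) + 2) '1' = (pre ++ ['0']) ++ '1' :: '1' :: r := by
            have h2 : ((pre.length : Int) + 2) = (((pre.length + 2 : Nat) : Int)) := by
              push_cast; ring
            rw [h2, PySem.List.pySetD_natCast]
            rw [show pre ++ '0' :: '1' :: '0' :: r = (pre ++ ['0', '1']) ++ '0' :: r by simp]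
            rw [List.set_append_right _ _ (by simp)]
            simp
          rw [hset, loopD_match r acc]
          have hrec := ih ('1' :: '1' :: r) (pre ++ ['0']) (acc + 1) (by simp; omega)
          have hbound : ((pre.length : Int) + 1) + ((('1' :: '1' :: r).length : Nat) : Int) - 2
              = (pre.length : Int) + ((('0' :: '1' :: '0' :: r).length : Nat) : Int) - 2 := by
            simp only [List.length_cons]; push_cast; ring
          have hstart : (((pre ++ ['0']).length : Nat) : Int) = (pre.length : Int) + 1 := by
            simp
          rw [hstart, hbound] at hrec
          exact hrec
        · simp only [hslice]
          rw [if_neg (by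
            intro hcontr
            injection hcontr with e1 hcontr; injection hcontr with e2 hcontr
            injection hcontr with e3 _
            exact hm ⟨e1, e2, e3⟩)]
          rw [loopD_nomatch a b c r acc hm]
          have hrec := ih (b :: c :: r) (pre ++ [a]) acc (by simp; omega)
          rw [show (pre ++ [a]) ++ b :: c :: r = pre ++ a :: b :: c :: r by simp] at hrec
          have hbound : ((pre.length : Int) + 1) + (((b :: c :: r).length : Nat) : Int) - 2
              = (pre.length : Int) + (((a :: b :: c :: r).length : Nat) : Int) - 2 := by
            simp only [List.length_cons]; push_cast; ring
          have hstart : (((pre ++ [a]).length : Nat) : Int) = (pre.length : Int) + 1 := by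
            simp
          rw [hstart, hbound] at hrec
          exact hrec

lemma go_eq_cnt : ∀ (fuel : Nat) (l : List Char) (acc : Nat), l.length ≤ fuel →
    PySem.Chars.count.go ['0', '1', '0'] fuel l acc = acc + cnt l := by
  intro fuel
  induction fuel with
  | zero =>
      intro l acc h
      have hl : l = [] := List.length_eq_zero_iff.mp (Nat.le_zero.mp h)
      subst hl
      rw [PySem.Chars.count.go.eq_def]
      rfl
  | succ m ih =>
      intro l acc h
      match l with
      | [] => rw [PySem.Chars.count.go.eq_def]; rfl
      | [x] =>
          rw [PySem.Chars.count.go.eq_def]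
          have hp : (['0', '1', '0'] : List Char).isPrefixOf [x] = false := by
            simp [List.isPrefixOf]
          simp only [hp, Bool.false_eq_true, if_false]
          rw [ih [] acc (by simp), cnt_nil, cnt_one x]
      | [x, y] =>
          rw [PySem.Chars.count.go.eq_def]
          have hp : (['0', '1', '0'] : List Char).isPrefixOf [x, y] = false := by
            simp [List.isPrefixOf]
          simp only [hp, Bool.false_eq_true, if_false]
          rw [ih [y] acc (by simp at h ⊢; omega), cnt_one y, cnt_two x y]
      | x :: y :: z :: r =>
          rw [PySem.Chars.count.go.eq_def]
          by_cases hm : x = '0' ∧ y = '1' ∧ z = '0'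
          · obtain ⟨h1, h2, h3⟩ := hm
            subst h1; subst h2; subst h3
            have hp : (['0', '1', '0'] : List Char).isPrefixOf ('0' :: '1' :: '0' :: r) = true := by
              simp [List.isPrefixOf]
            simp only [hp, if_true]
            have hdrop : List.drop (['0', '1', '0'] : List Char).length ('0' :: '1' :: '0' :: r) = r := by
              simp
            rw [hdrop, ih r (acc + 1) (by simp at h; omega), cnt_match]
            omega
          · have hp : (['0', '1', '0'] : List Char).isPrefixOf (x :: y :: z :: r) = false := by
              rw [Bool.eq_false_iff]
              intro htrue
              obtain ⟨s, hs⟩ := List.isPrefixOf_iff_prefix.mp htrue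
              simp at hs
              exact hm ⟨hs.1.symm, hs.2.1.symm, hs.2.2.1.symm⟩
            simp only [hp, Bool.false_eq_true, if_false]
            rw [ih (y :: z :: r) acc (by simp at h ⊢; omega), cnt_cons₃, if_neg hm]

-- ===== VERDICT (by name: the statement is the Claim_ definition above) =====
theorem beautifulBinaryString_spec : Claim_equal_beautifulBinaryString := by
  intro b _
  unfold Spec_beautifulBinaryString beautifulBinaryString beautifulBinaryString_alt
  have hA := bridge b.toList.length b.toList [] 0 rfl
  simp only [List.nil_append, List.length_nil, Nat.cast_zero, zero_add] at hA
  have hlen : PySem.Str.len b = (b.toList.length : Int) := by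
    simp [PySem.Str.len_eq]
  rw [hlen, hA, loopD_eq_cnt b.toList.length b.toList 0 rfl]
  have h010 : "010".toList = ['0', '1', '0'] := rfl
  have hB : PySem.Str.count b "010" = PySem.Chars.count b.toList ['0', '1', '0'] := by
    rw [PySem.Str.count_eq, h010]
  rw [hB, PySem.Chars.count]
  simp only [List.isEmpty_cons, Bool.false_eq_true, if_false]
  rw [go_eq_cnt b.toList.length b.toList 0 le_rfl]
  simp
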